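-- pv_equiv track=rewrite | github.com/kangk1204/BRAID | benchmarks/run_benchmark.py | _collect_all_exons
-- ===== SOURCE A (Python) =====
-- def _collect_all_exons(
--     transcripts: dict[str, list[tuple[int, int]]],
-- ) -> list[tuple[int, int]]:
--     """Collect all unique exon intervals across transcripts.
--
--     Args:
--         transcripts: Mapping from transcript ID to sorted exon list.
--
--     Returns:
--         Sorted list of unique (start, end) exon intervals.
--     """
--     exon_set: set[tuple[int, int]] = set()
--     for exons in transcripts.values():
--         for exon in exons:
--             exon_set.add(exon)
--     return sorted(exon_set)
-- ===== SOURCE B (Python) =====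
-- def _collect_all_exons(
--     transcripts: dict[str, list[tuple[int, int]]],
-- ) -> list[tuple[int, int]]:
--     """Collect all unique exon intervals across transcripts.
--
--     Flatten all exon lists, sort once, then keep each tuple only when it
--     differs from the previously kept one (adjacent dedup on a sorted list).
--     """
--     flat = [exon for exons in transcripts.values() for exon in exons]
--     flat.sort()
--     out: list[tuple[int, int]] = []
--     for exon in flat:
--         if not out or exon != out[-1]:
--             out.append(exon)
--     return out
-- ===== Notes on version B (the rewrite author's own statement) =====
-- stated objective: alternative
-- what changed: Replaces the hash-set accumulation loop followed by a sort with a flatten-then-sort-once pass and a linear adjacent-deduplication scan over the sorted list.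
import Mathlib
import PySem

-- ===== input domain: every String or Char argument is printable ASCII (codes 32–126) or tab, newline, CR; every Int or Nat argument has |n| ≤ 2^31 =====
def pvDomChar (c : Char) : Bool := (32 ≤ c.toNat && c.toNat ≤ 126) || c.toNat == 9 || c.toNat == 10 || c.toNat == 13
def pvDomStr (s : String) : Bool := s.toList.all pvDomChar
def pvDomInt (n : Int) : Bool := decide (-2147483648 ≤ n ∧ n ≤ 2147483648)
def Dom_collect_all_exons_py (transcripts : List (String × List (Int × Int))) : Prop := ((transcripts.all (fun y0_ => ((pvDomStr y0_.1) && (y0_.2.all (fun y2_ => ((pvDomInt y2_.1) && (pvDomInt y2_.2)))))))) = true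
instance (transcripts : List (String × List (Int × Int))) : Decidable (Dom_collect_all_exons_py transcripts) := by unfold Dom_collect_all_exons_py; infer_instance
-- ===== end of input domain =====

-- B replaces A's hash-set accumulation + final sort with flatten, one sort, and a linear
-- adjacent-dedup scan: a different decomposition of the same task, same asymptotic cost.


-- ===== PORT A =====
-- exon_set = set(); for exons in transcripts.values(): for exon in exons: exon_set.add(exon); return sorted(exon_set)
def collect_all_exons_py (transcripts : List (String × List (Int × Int))) : List (Int × Int) :=
  let exonSet : PySem.Set (Int × Int) :=
    transcripts.foldl (fun s tr => tr.2.foldl (fun s e => PySem.Set.add s e) s) PySem.Set.empty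
  PySem.List.sorted2 exonSet (fun p => p.1) (fun p => p.2)

-- ===== PORT B =====
-- flat = [exon for exons in transcripts.values() for exon in exons]; flat.sort();
-- out = []; for exon in flat: if not out or exon != out[-1]: out.append(exon); return out
def collect_all_exons_py_alt (transcripts : List (String × List (Int × Int))) : List (Int × Int) :=
  let flat : List (Int × Int) := transcripts.flatMap (fun tr => tr.2)
  let srt := PySem.List.sorted2 flat (fun p => p.1) (fun p => p.2)
  srt.foldl (fun out e => if out.getLast? = some e then out else out ++ [e]) []

-- ===== PRECONDITION & SPEC =====
def Spec_collect_all_exons_py (transcripts : List (String × List (Int × Int))) (out : List (Int × Int)) : Prop := out = collect_all_exons_py_alt transcripts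
instance (transcripts : List (String × List (Int × Int))) (out : List (Int × Int)) : Decidable (Spec_collect_all_exons_py transcripts out) := by unfold Spec_collect_all_exons_py; infer_instance

-- ===== CLAIM (what is proved, stated in full; the proofs are below) =====
def Claim_equal_collect_all_exons_py : Prop := ∀ (transcripts : List (String × List (Int × Int))), Dom_collect_all_exons_py transcripts → Spec_collect_all_exons_py transcripts (collect_all_exons_py transcripts)

-- ===== LEMMAS AND PROOFS =====

-- sorted2 with fst/snd keys is sorted by the lexicographic key (Python's tuple order).
theorem sorted2_eq_sorted_toLex (xs : List (Int × Int)) :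
    PySem.List.sorted2 xs (fun p => p.1) (fun p => p.2)
      = PySem.List.sorted xs (fun p => toLex p) := by
  unfold PySem.List.sorted2 PySem.List.sorted
  have hb : (fun (a b : Int × Int) =>
        (decide (a.1 < b.1) || (!decide (b.1 < a.1) && decide (a.2 < b.2))))
      = fun (a b : Int × Int) => decide (toLex a < toLex b) := by
    funext a b
    simp only [Prod.Lex.lt_iff, ofLex_toLex]
    by_cases h1 : a.1 < b.1 <;> by_cases h2 : b.1 < a.1 <;> by_cases h3 : a.2 < b.2 <;>
      simp [h1, h2, h3] <;> omega
  simp only [hb, Bool.false_eq_true, if_false]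

-- folding Set.add over a flattened list is the nested A-loops
theorem foldl_add_flatMap (l : List (String × List (Int × Int)))
    (init : List (Int × Int)) :
    (l.flatMap (fun tr => tr.2)).foldl (fun s e => PySem.Set.add s e) init
      = l.foldl (fun s tr => tr.2.foldl (fun s e => PySem.Set.add s e) s) init := by
  induction l generalizing init with
  | nil => rfl
  | cons h t ih => simp [List.flatMap_cons, List.foldl_append, ih]

-- adjacent dedup, tracking the previously kept element
def dedupAdjFrom (p : Option (Int × Int)) : List (Int × Int) → List (Int × Int)
  | [] => []
  | x :: t => if p = some x then dedupAdjFrom p t else x :: dedupAdjFrom (some x) t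

theorem foldl_dedup_eq (xs : List (Int × Int)) (acc : List (Int × Int)) :
    xs.foldl (fun out e => if out.getLast? = some e then out else out ++ [e]) acc
      = acc ++ dedupAdjFrom acc.getLast? xs := by
  induction xs generalizing acc with
  | nil => simp [dedupAdjFrom]
  | cons x t ih =>
    simp only [List.foldl_cons, dedupAdjFrom]
    by_cases h : acc.getLast? = some x
    · simp [h, ih]
    · simp only [if_neg h, ih (acc ++ [x]), List.getLast?_concat]
      simp

-- membership: dedupAdjFrom none keeps exactly the members
theorem mem_dedupAdjFrom_subset (p : Option (Int × Int)) (xs : List (Int × Int)) (x : Int × Int) :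
    x ∈ dedupAdjFrom p xs → x ∈ xs := by
  induction xs generalizing p with
  | nil => simp [dedupAdjFrom]
  | cons y t ih =>
    simp only [dedupAdjFrom]
    by_cases h : p = some y
    · rw [if_pos h]
      intro hx; exact List.mem_cons_of_mem _ (ih _ hx)
    · simp only [if_neg h, List.mem_cons]
      rintro (rfl | hx)
      · exact Or.inl rfl
      · exact Or.inr (ih _ hx)

theorem mem_of_mem_dedupAdjFrom (p : Option (Int × Int)) (xs : List (Int × Int)) (x : Int × Int)
    (hx : x ∈ xs) : x ∈ dedupAdjFrom p xs ∨ p = some x := by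
  induction xs generalizing p with
  | nil => simp at hx
  | cons y t ih =>
    simp only [dedupAdjFrom]
    rcases List.mem_cons.mp hx with rfl | hxt
    · by_cases h : p = some x
      · exact Or.inr h
      · left; simp [if_neg h]
    · by_cases h : p = some y
      · rw [if_pos h]
        rcases ih p hxt with h' | h'
        · exact Or.inl h'
        · exact Or.inr h'
      · rw [if_neg h]
        rcases ih (some y) hxt with h' | h'
        · exact Or.inl (List.mem_cons_of_mem _ h')
        · left; rw [Option.some_inj] at h'; subst h'; exact List.mem_cons_self

-- on a ≤-sorted list (lex key), adjacent dedup yields a strictly increasing list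
theorem dedupAdjFrom_pairwise (xs : List (Int × Int)) :
    ∀ (p : Option (Int × Int)),
    xs.Pairwise (fun a b => toLex a ≤ toLex b) →
    (∀ q, p = some q → ∀ y ∈ xs, toLex q ≤ toLex y) →
    (dedupAdjFrom p xs).Pairwise (fun a b => toLex a < toLex b) ∧
      (∀ q, p = some q → ∀ z ∈ dedupAdjFrom p xs, toLex q < toLex z) := by
  induction xs with
  | nil => intro p _ _; exact ⟨List.Pairwise.nil, by simp [dedupAdjFrom]⟩
  | cons y t ih =>
    intro p hpw hbound
    have hyt : ∀ z ∈ t, toLex y ≤ toLex z := fun z hz => (List.pairwise_cons.mp hpw).1 z hz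
    have htpw := (List.pairwise_cons.mp hpw).2
    by_cases h : p = some y
    · subst h
      have := ih (some y) htpw (by intro q hq z hz; rw [Option.some_inj] at hq; subst hq; exact hyt z hz)
      simp only [dedupAdjFrom, reduceIte]
      exact this
    · have ihy := ih (some y) htpw (by intro q hq z hz; rw [Option.some_inj] at hq; subst hq; exact hyt z hz)
      simp only [dedupAdjFrom, if_neg h]
      constructor
      · exact List.pairwise_cons.mpr ⟨fun z hz => ihy.2 y rfl z hz, ihy.1⟩
      · intro q hq z hz
        subst hq
        have hqy : toLex q < toLex y := by
          have hle : toLex q ≤ toLex y := hbound q rfl y List.mem_cons_self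
          have hne : q ≠ y := fun e => h (by rw [e])
          exact lt_of_le_of_ne hle (fun e => hne (toLex.injective e))
        rcases List.mem_cons.mp hz with rfl | hz'
        · exact hqy
        · exact lt_trans hqy (ihy.2 y rfl z hz')

-- ===== VERDICT (by name: the statement is the Claim_ definition above) =====
theorem collect_all_exons_py_spec : Claim_equal_collect_all_exons_py := by
  intro ts _
  unfold Spec_collect_all_exons_py collect_all_exons_py collect_all_exons_py_alt
  simp only [sorted2_eq_sorted_toLex]
  set flat := ts.flatMap (fun tr => tr.2) with hflat
  set S := PySem.List.sorted flat (fun p => toLex p) with hS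
  -- B's loop is adjacent dedup
  rw [foldl_dedup_eq]
  simp only [List.getLast?_nil, List.nil_append]
  set r := dedupAdjFrom none S with hr
  -- A's set build is set(flat)
  rw [← foldl_add_flatMap]
  have hA : flat.foldl (fun s e => PySem.Set.add s e) PySem.Set.empty = PySem.Set.ofList flat := rfl
  rw [hA]
  -- r is strictly increasing and a permutation of set(flat)
  have hpw : r.Pairwise (fun a b => toLex a < toLex b) :=
    (dedupAdjFrom_pairwise S none (PySem.List.sorted_pairwise flat (fun p => toLex p)) (by simp)).1
  have hnodr : r.Nodup := by
    apply List.Pairwise.imp _ hpw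
    intro a b h e; subst e; exact lt_irrefl _ h
  have hmem : ∀ x, x ∈ r ↔ x ∈ PySem.Set.ofList flat := by
    intro x
    rw [PySem.Set.mem_ofList]
    constructor
    · intro hx
      have := mem_dedupAdjFrom_subset none S x hx
      rwa [hS, PySem.List.mem_sorted] at this
    · intro hx
      have hx' : x ∈ S := by rw [hS, PySem.List.mem_sorted]; exact hx
      rcases mem_of_mem_dedupAdjFrom none S x hx' with h' | h'
      · exact h'
      · exact absurd h' (by simp)
  have hperm : r.Perm (PySem.Set.ofList flat) :=
    (List.perm_ext_iff_of_nodup hnodr (PySem.Set.nodup_ofList flat)).mpr hmem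
  exact PySem.List.sorted_eq_of_perm_of_pairwise_lt _ r (fun p => toLex p) hperm hpw
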